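-- pv_equiv track=rewrite | github.com/ArtifactDB/dolomite-matrix | src/dolomite_matrix/choose_dense_chunk_sizes.py | choose_dense_chunk_sizes
-- ===== SOURCE A (Python) =====
-- from typing import Tuple, Any
--
-- def choose_dense_chunk_sizes(shape: Tuple[int, ...], size: int, min_extent: int = 100, memory: int = 1e7) -> Tuple[int, ...]:
--     """Choose some chunk sizes to use for a dense HDF5 dataset. For each
--     dimension, we consider a slice of the array that consists of the full
--     extent of all other dimensions. We want this slice to occupy less than
--     ``memory`` in memory, and we resize the slice along the current dimension
--     to achieve this. The chosen chunk size is then defined as the size of the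
--     slice along the current dimension. This ensures that efficient iteration
--     along each dimension will not use any more than ``memory`` bytes.
--
--     Args:
--         shape: Shape of the array.
--
--         size: Size of each array element in bytes.
--
--         min_extent:
--             Minimum extent of each chunk dimension, to avoid problems
--             with excessively small chunk sizes when the data is large.
--
--         memory:
--             Size of the (conceptual) memory buffer to use for storing blocks of
--             data during iteration through the array, in bytes.
--
--     Returns:
--         Tuple containing the chunk dimensions.
--     """
--
--     num_elements = int(memory / size)
--     chunks = []
--
--     for d, s in enumerate(shape):
--         otherdim = 1
--         for d2, s2 in enumerate(shape): # just calculating it again to avoid overflow issues.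
--             if d2 != d:
--                 otherdim *= s2
--
--         proposed = int(num_elements / otherdim)
--         if proposed > s:
--             proposed = s
--         elif proposed < min_extent:
--             proposed = min_extent
--
--         chunks.append(proposed)
--
--     return (*chunks,)
-- ===== SOURCE B (Python) =====
-- def choose_dense_chunk_sizes(shape, size, min_extent=100, memory=1e7):
--     # Prefix/suffix product tables: product of all other dims without rescanning shape per dimension.
--     num_elements = int(memory / size)
--     n = len(shape)
--     prefix = [1] * n
--     for i in range(1, n):
--         prefix[i] = prefix[i - 1] * shape[i - 1]
--     suffix = [1] * n
--     for i in range(n - 2, -1, -1):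
--         suffix[i] = suffix[i + 1] * shape[i + 1]
--     chunks = []
--     for d, s in enumerate(shape):
--         proposed = int(num_elements / (prefix[d] * suffix[d]))
--         if proposed > s:
--             proposed = s
--         elif proposed < min_extent:
--             proposed = min_extent
--         chunks.append(proposed)
--     return (*chunks,)
-- ===== Notes on version B (the rewrite author's own statement) =====
-- stated objective: faster
-- what changed: Replaces A's per-dimension rescan of the whole shape (quadratic in the number of dimensions) with prefix- and suffix-product tables built in two linear passes, so each dimension's 'product of all other extents' is a single multiplication.
import Mathlib
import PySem

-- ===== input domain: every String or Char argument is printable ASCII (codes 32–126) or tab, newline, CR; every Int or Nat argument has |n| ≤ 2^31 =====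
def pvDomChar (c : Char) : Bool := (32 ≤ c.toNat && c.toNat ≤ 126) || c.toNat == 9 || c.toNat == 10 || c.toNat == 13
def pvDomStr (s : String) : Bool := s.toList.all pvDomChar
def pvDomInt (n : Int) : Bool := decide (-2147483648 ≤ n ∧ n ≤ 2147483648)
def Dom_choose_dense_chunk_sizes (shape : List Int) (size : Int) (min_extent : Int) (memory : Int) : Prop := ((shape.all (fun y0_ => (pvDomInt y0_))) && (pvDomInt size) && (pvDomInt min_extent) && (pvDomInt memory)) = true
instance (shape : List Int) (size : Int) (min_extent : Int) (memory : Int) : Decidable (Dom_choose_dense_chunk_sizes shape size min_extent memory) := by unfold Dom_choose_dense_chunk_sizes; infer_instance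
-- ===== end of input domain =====

-- B replaces A's per-dimension rescan of shape with prefix/suffix product tables (O(n) instead of O(n^2) multiplications).
-- Python's int(x / y) (float true division, then truncation) is ported as PySem.Int.truncdiv: exact here because the
-- numerator is |·| ≤ 2^31 on Dom (for any integer divisor the correctly-rounded float quotient truncates like tdiv).

-- ===== PORT A =====
def choose_dense_chunk_sizes (shape : List Int) (size : Int) (min_extent : Int) (memory : Int) : List Int :=
  let num_elements := PySem.Int.truncdiv memory size
  (PySem.List.enumerate shape 0).foldl
    (fun chunks ds =>
      let otherdim := (PySem.List.enumerate shape 0).foldl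
        (fun o p => if p.1 ≠ ds.1 then o * p.2 else o) 1
      let proposed := PySem.Int.truncdiv num_elements otherdim
      let proposed := if proposed > ds.2 then ds.2
                      else if proposed < min_extent then min_extent else proposed
      chunks ++ [proposed]) []

-- ===== PORT B =====
-- prefix[i] = product of shape[0..i-1], built left-to-right carrying the running product p (Source B's first loop)
def pvPrefixList (p : Int) : List Int → List Int
  | [] => []
  | s :: rest => p :: pvPrefixList (p * s) rest

-- (suffix list, total product): suffix[i] = product of shape[i+1..], built right-to-left (Source B's second loop)
def pvSuffix : List Int → List Int × Int
  | [] => ([], 1)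
  | s :: rest =>
    let lq := pvSuffix rest
    (lq.2 :: lq.1, s * lq.2)

def choose_dense_chunk_sizes_alt (shape : List Int) (size : Int) (min_extent : Int) (memory : Int) : List Int :=
  let num_elements := PySem.Int.truncdiv memory size
  let pre := pvPrefixList 1 shape
  let suf := (pvSuffix shape).1
  List.zipWith
    (fun sp q =>
      let proposed := PySem.Int.truncdiv num_elements (sp.2 * q)
      if proposed > sp.1 then sp.1
      else if proposed < min_extent then min_extent else proposed)
    (shape.zip pre) suf

-- ===== PRECONDITION & SPEC =====
-- A raises ZeroDivisionError iff size = 0, or some extent is 0 while the shape has ≥ 2 dimensions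
-- (then the product of the other dimensions is 0); Pre_ excludes exactly those inputs.
def Pre_choose_dense_chunk_sizes (shape : List Int) (size : Int) (min_extent : Int) (memory : Int) : Prop :=
  size ≠ 0 ∧ (¬ (0 : Int) ∈ shape ∨ shape.length ≤ 1)
instance (shape : List Int) (size : Int) (min_extent : Int) (memory : Int) : Decidable (Pre_choose_dense_chunk_sizes shape size min_extent memory) := by unfold Pre_choose_dense_chunk_sizes; infer_instance
def pvWitness_choose_dense_chunk_sizes : List Int × Int × Int × Int := ([100, 200], 8, 100, 10000000)

def Spec_choose_dense_chunk_sizes (shape : List Int) (size : Int) (min_extent : Int) (memory : Int) (out : List Int) : Prop := out = choose_dense_chunk_sizes_alt shape size min_extent memory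
instance (shape : List Int) (size : Int) (min_extent : Int) (memory : Int) (out : List Int) : Decidable (Spec_choose_dense_chunk_sizes shape size min_extent memory out) := by unfold Spec_choose_dense_chunk_sizes; infer_instance

-- ===== CLAIM (what is proved, stated in full; the proofs are below) =====
def Claim_equal_choose_dense_chunk_sizes : Prop := ∀ (shape : List Int) (size : Int) (min_extent : Int) (memory : Int), Dom_choose_dense_chunk_sizes shape size min_extent memory → Pre_choose_dense_chunk_sizes shape size min_extent memory → Spec_choose_dense_chunk_sizes shape size min_extent memory (choose_dense_chunk_sizes shape size min_extent memory)

-- ===== LEMMAS AND PROOFS =====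

-- Inner fold of A when the skipped index d lies strictly before the enumeration start: nothing is skipped.
theorem pv_fold_all (d : Int) : ∀ (l : List Int) (k : Int), d < k → ∀ (o : Int),
    (PySem.List.enumerate l k).foldl (fun o p => if p.1 ≠ d then o * p.2 else o) o = o * l.prod := by
  intro l
  induction l with
  | nil => intro k _ o; simp [PySem.List.enumerate_nil]
  | cons x rest ih =>
    intro k hk o
    rw [PySem.List.enumerate_cons]
    simp only [List.foldl_cons]
    have hne : (k ≠ d) := by omega
    simp only [hne, if_pos, ne_eq, not_false_iff]
    rw [ih (k + 1) (by omega) (o * x)]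
    simp [List.prod_cons]; ring

-- Inner fold of A with skipped index d ≥ start k: product of the elements at positions ≠ d.
theorem pv_fold_skip (d : Int) : ∀ (l : List Int) (k : Int), k ≤ d → ∀ (o : Int),
    (PySem.List.enumerate l k).foldl (fun o p => if p.1 ≠ d then o * p.2 else o) o
      = o * ((l.take (d - k).toNat).prod * (l.drop ((d - k).toNat + 1)).prod) := by
  intro l
  induction l with
  | nil => intro k _ o; simp [PySem.List.enumerate_nil]
  | cons x rest ih =>
    intro k hk o
    rw [PySem.List.enumerate_cons]
    simp only [List.foldl_cons]
    by_cases h : k = d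
    · have h0 : (d - k).toNat = 0 := by omega
      rw [if_neg (by omega)]
      rw [h, pv_fold_all d rest (d + 1) (by omega) o]
      have h1 : (d - d).toNat = 0 := by omega
      rw [h1]
      simp
    · have hne : (k ≠ d) := h
      simp only [hne, ne_eq, not_false_iff, if_true]
      rw [ih (k + 1) (by omega) (o * x)]
      have h1 : (d - k).toNat = (d - (k + 1)).toNat + 1 := by omega
      rw [h1]
      simp [List.take_succ_cons, List.drop_succ_cons, List.prod_cons]; ring

theorem pv_prefix_length : ∀ (l : List Int) (p : Int), (pvPrefixList p l).length = l.length := by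
  intro l; induction l with
  | nil => intro p; simp [pvPrefixList]
  | cons x rest ih => intro p; simp [pvPrefixList, ih]

theorem pv_prefix_get : ∀ (l : List Int) (p : Int) (i : Nat) (h : i < l.length),
    (pvPrefixList p l)[i]'(by rw [pv_prefix_length]; exact h) = p * (l.take i).prod := by
  intro l
  induction l with
  | nil => intro p i h; simp at h
  | cons x rest ih =>
    intro p i h
    cases i with
    | zero => simp [pvPrefixList]
    | succ j =>
      have hj : j < rest.length := by simpa using h
      simp only [pvPrefixList, List.getElem_cons_succ]
      rw [ih (p * x) j hj]
      simp [List.take_succ_cons, List.prod_cons]; ring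

theorem pv_suffix_snd : ∀ (l : List Int), (pvSuffix l).2 = l.prod := by
  intro l; induction l with
  | nil => simp [pvSuffix]
  | cons x rest ih => simp [pvSuffix, ih]

theorem pv_suffix_length : ∀ (l : List Int), (pvSuffix l).1.length = l.length := by
  intro l; induction l with
  | nil => simp [pvSuffix]
  | cons x rest ih => simp [pvSuffix, ih]

theorem pv_suffix_get : ∀ (l : List Int) (i : Nat) (h : i < l.length),
    (pvSuffix l).1[i]'(by rw [pv_suffix_length]; exact h) = (l.drop (i + 1)).prod := by
  intro l
  induction l with
  | nil => intro i h; simp at h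
  | cons x rest ih =>
    intro i h
    cases i with
    | zero => simp [pvSuffix, pv_suffix_snd]
    | succ j =>
      have hj : j < rest.length := by simpa using h
      simp only [pvSuffix, List.getElem_cons_succ]
      rw [ih j hj]
      simp [List.drop_succ_cons]

-- ===== VERDICT (by name: the statement is the Claim_ definition above) =====
theorem choose_dense_chunk_sizes_spec : Claim_equal_choose_dense_chunk_sizes := by
  intro shape size min_extent memory _ _
  unfold Spec_choose_dense_chunk_sizes choose_dense_chunk_sizes choose_dense_chunk_sizes_alt
  simp only []
  rw [PySem.List.foldl_append_singleton_eq_map]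
  apply List.ext_getElem
  · simp [PySem.List.length_enumerate, pv_prefix_length, pv_suffix_length]
  · intro i h1 h2
    have hi : i < shape.length := by
      simpa [PySem.List.length_enumerate] using h1
    simp only [List.nil_append, List.getElem_map, List.getElem_zipWith, List.getElem_zip,
        PySem.List.getElem_enumerate, zero_add]
    rw [pv_fold_skip ((i : Int)) shape 0 (by omega) 1,
        pv_prefix_get shape 1 i hi, pv_suffix_get shape i hi]
    have ht : ((i : Int) - 0).toNat = i := by omega
    rw [ht]
    simp only [one_mul]
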